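-- pv_equiv track=rewrite | github.com/FirneyGroup/mcp-broker | src/broker/config.py | _format_missing_vars
-- ===== SOURCE A (Python) =====
-- def _format_missing_vars(missing: list[tuple[str, tuple[str, ...]]]) -> str:
--     """Human-readable error listing every missing env var + its settings.yaml path."""
--     # Group by env var name — one var may be referenced in multiple places.
--     by_var: dict[str, list[tuple[str, ...]]] = {}
--     for var_name, path in missing:
--         by_var.setdefault(var_name, []).append(path)
--     body = [
--         line
--         for var_name in sorted(by_var)
--         for line in _format_var_block(var_name, by_var[var_name])
--     ]
--     return "\n".join(
--         [
--             "",
--             "Broker cannot start — required environment variables not set:",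
--             "",
--             *body,
--             "",
--             "Fix: add the variable(s) to .env, or remove the referencing block",
--             "     from settings.yaml if the integration isn't needed.",
--             "",
--         ]
--     )
--
-- def _format_var_block(var_name: str, paths: list[tuple[str, ...]]) -> list[str]:
--     """Render one missing-var entry: the var name followed by each yaml path it occurs at."""
--     lines = [f"  {var_name}"]
--     for path in paths:
--         yaml_path = ".".join(path) if path else "(root)"
--         lines.append(f"      settings.yaml: {yaml_path}")
--     return lines
-- ===== SOURCE B (Python) =====
-- def _format_missing_vars(missing):
--     """Human-readable error listing every missing env var + its settings.yaml path."""
--     body = []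
--     for name in sorted({var for var, _ in missing}):
--         body.append(f"  {name}")
--         for var, path in missing:
--             if var == name:
--                 yaml_path = ".".join(path) if path else "(root)"
--                 body.append(f"      settings.yaml: {yaml_path}")
--     return "\n".join(
--         [
--             "",
--             "Broker cannot start — required environment variables not set:",
--             "",
--             *body,
--             "",
--             "Fix: add the variable(s) to .env, or remove the referencing block",
--             "     from settings.yaml if the integration isn't needed.",
--             "",
--         ]
--     )
-- ===== Notes on version B (the rewrite author's own statement) =====
-- stated objective: alternative
-- what changed: The dict-grouping pass (setdefault/append index, then sorted keys looked up in the dict) is replaced by no dict at all: sorted(set of var names) drives the output and each name's paths are collected by a direct filter scan of the input.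
import Mathlib
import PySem

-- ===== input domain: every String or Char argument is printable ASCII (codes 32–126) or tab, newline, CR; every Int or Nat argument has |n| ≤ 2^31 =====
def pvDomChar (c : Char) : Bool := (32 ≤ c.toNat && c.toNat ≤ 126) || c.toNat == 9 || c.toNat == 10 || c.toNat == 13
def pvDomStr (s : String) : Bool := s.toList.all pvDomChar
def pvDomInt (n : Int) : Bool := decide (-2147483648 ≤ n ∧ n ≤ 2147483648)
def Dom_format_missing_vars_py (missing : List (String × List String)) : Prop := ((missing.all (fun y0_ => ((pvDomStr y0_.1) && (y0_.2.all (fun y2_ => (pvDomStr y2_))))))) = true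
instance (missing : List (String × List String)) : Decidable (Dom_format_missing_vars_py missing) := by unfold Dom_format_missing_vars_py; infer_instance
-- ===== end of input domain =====

-- B drops A's dict index: it iterates sorted(set of var names) and gathers each name's
-- paths by filtering the input directly (alternative decomposition, not claimed faster).
-- ===== PORT A =====
-- _format_var_block: "  var" header then one indented line per path
def formatVarBlock (var_name : String) (paths : List (List String)) : List String :=
  paths.foldl
    (fun lines path =>
      lines ++ ["      settings.yaml: " ++ (if path ≠ [] then PySem.Str.join "." path else "(root)")])
    ["  " ++ var_name]

def format_missing_vars_py (missing : List (String × List String)) : String :=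
  let by_var : PySem.Dict String (List (List String)) :=
    missing.foldl (fun d p => d.modify p.1 [] (fun l => l ++ [p.2])) PySem.Dict.empty
  let body :=
    (PySem.List.sorted by_var.keys (fun k => k) false).flatMap
      (fun var_name => formatVarBlock var_name (by_var.getD var_name []))
  PySem.Str.join "\n"
    (["", "Broker cannot start — required environment variables not set:", ""]
      ++ body
      ++ ["", "Fix: add the variable(s) to .env, or remove the referencing block",
          "     from settings.yaml if the integration isn't needed.", ""])

-- ===== PORT B =====
def format_missing_vars_py_alt (missing : List (String × List String)) : String :=
  let body :=
    (PySem.List.sorted (PySem.Set.ofList (missing.map (·.1))) (fun k => k) false).foldl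
      (fun body name =>
        missing.foldl
          (fun body p =>
            if p.1 == name then
              body ++ ["      settings.yaml: " ++ (if p.2 ≠ [] then PySem.Str.join "." p.2 else "(root)")]
            else body)
          (body ++ ["  " ++ name]))
      []
  PySem.Str.join "\n"
    (["", "Broker cannot start — required environment variables not set:", ""]
      ++ body
      ++ ["", "Fix: add the variable(s) to .env, or remove the referencing block",
          "     from settings.yaml if the integration isn't needed.", ""])

-- ===== PRECONDITION & SPEC =====
def Spec_format_missing_vars_py (missing : List (String × List String)) (out : String) : Prop := out = format_missing_vars_py_alt missing
instance (missing : List (String × List String)) (out : String) : Decidable (Spec_format_missing_vars_py missing out) := by unfold Spec_format_missing_vars_py; infer_instance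

-- ===== CLAIM (what is proved, stated in full; the proofs are below) =====
def Claim_equal_format_missing_vars_py : Prop := ∀ (missing : List (String × List String)), Dom_format_missing_vars_py missing → Spec_format_missing_vars_py missing (format_missing_vars_py missing)

-- ===== LEMMAS AND PROOFS =====
theorem pv_keys_eq (missing : List (String × List String)) :
    (missing.foldl (fun d p => d.modify p.1 [] (fun l => l ++ [p.2]))
      (PySem.Dict.empty : PySem.Dict String (List (List String)))).keys
      = PySem.Set.ofList (missing.map (·.1)) := by
  rw [PySem.Dict.keys_foldl_modify_key]
  simp [PySem.Dict.keys_empty, PySem.Set.update_nil_left]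

theorem pv_getD_eq (missing : List (String × List String)) (v : String) :
    (missing.foldl (fun d p => d.modify p.1 [] (fun l => l ++ [p.2]))
      (PySem.Dict.empty : PySem.Dict String (List (List String)))).getD v []
      = (missing.filter (fun p => p.1 == v)).map (·.2) := by
  rw [PySem.Dict.getD_foldl_modify_append]
  simp [PySem.Dict.getD_empty]

theorem pv_block_eq (v : String) (paths : List (List String)) :
    formatVarBlock v paths
      = ("  " ++ v) ::
        paths.map (fun path =>
          "      settings.yaml: " ++ (if path ≠ [] then PySem.Str.join "." path else "(root)")) := by
  unfold formatVarBlock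
  rw [PySem.List.foldl_append_singleton_eq_map]
  rfl

theorem pv_outer_foldl (missing : List (String × List String)) (names : List String) (acc : List String) :
    names.foldl
      (fun body name =>
        missing.foldl
          (fun body p =>
            if p.1 == name then
              body ++ ["      settings.yaml: " ++ (if p.2 ≠ [] then PySem.Str.join "." p.2 else "(root)")]
            else body)
          (body ++ ["  " ++ name]))
      acc
    = acc ++ names.flatMap (fun name =>
        ("  " ++ name) ::
        ((missing.filter (fun p => p.1 == name)).map (·.2)).map (fun path =>
          "      settings.yaml: " ++ (if path ≠ [] then PySem.Str.join "." path else "(root)"))) := by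
  induction names generalizing acc with
  | nil => simp
  | cons n ns ih =>
    simp only [List.foldl_cons, List.flatMap_cons, ih]
    rw [PySem.List.foldl_append_if]
    simp [List.map_map, Function.comp]

-- ===== VERDICT (by name: the statement is the Claim_ definition above) =====
theorem format_missing_vars_py_spec : Claim_equal_format_missing_vars_py := by
  intro missing _
  show _ = _
  unfold format_missing_vars_py format_missing_vars_py_alt
  simp only [pv_keys_eq, pv_getD_eq, pv_block_eq, pv_outer_foldl, List.nil_append,
    List.map_map]
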